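-- pv_equiv track=rewrite | github.com/hemakesh-github/dsa | daba.py | daba
-- ===== SOURCE A (Python) =====
-- def daba(s):
--     d = {}
--     for i in range(len(s)):
--         if s[i] not in d:
--             d[s[i]] = [i]
--         else:
--             d[s[i]].append(i)
--     ans = 0
--     for i in d:
--         for j in range(len(d[i])-1):
--             for k in range(j+1, len(d[i])):
--                 ans += d[i][k] - d[i][j] -1
--
--     return ans
-- ===== SOURCE B (Python) =====
-- def daba(s):
--     ans = 0
--     d = {}
--     for i, c in enumerate(s):
--         if c in d:
--             cnt, tot = d[c]
--             ans += i * cnt - tot - cnt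
--             d[c] = (cnt + 1, tot + i)
--         else:
--             d[c] = (1, i)
--     return ans
-- ===== Notes on version B (the rewrite author's own statement) =====
-- stated objective: faster
-- what changed: Replaced the per-character index-list dictionary plus cubic-looking pairwise double loop by a single pass keeping, per character, a running (count, index-sum) pair, adding i*count - sum - count at each occurrence.
import Mathlib
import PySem

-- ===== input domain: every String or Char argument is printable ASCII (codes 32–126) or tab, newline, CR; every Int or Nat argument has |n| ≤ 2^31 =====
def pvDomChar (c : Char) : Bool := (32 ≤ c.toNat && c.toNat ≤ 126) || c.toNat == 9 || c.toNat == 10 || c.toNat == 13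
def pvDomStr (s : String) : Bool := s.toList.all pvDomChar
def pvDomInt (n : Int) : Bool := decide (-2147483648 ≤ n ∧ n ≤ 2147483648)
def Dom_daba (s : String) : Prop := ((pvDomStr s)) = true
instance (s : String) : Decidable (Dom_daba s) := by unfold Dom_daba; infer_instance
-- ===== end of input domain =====

-- B replaces A's per-char index-list dictionary + quadratic pair loop by one linear pass
-- keeping a (count, index-sum) pair per character; objective: faster.

-- ===== PORT A =====
-- A's first loop: build the dict char -> list of its indices
def dabaBuild (cs : List Char) : PySem.Dict Char (List Int) :=
  (PySem.List.pyRange 0 (PySem.List.len cs) 1).foldl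
    (fun d i =>
      let c := PySem.List.pyGetD cs i ' '
      if !(d.contains c) then d.insert c [i] else d.modify c [] (· ++ [i]))
    PySem.Dict.empty

def daba (s : String) : Int :=
  let cs := s.toList
  let d := dabaBuild cs
  d.keys.foldl (fun ans c =>
    let l := d.getD c []
    (PySem.List.pyRange 0 (PySem.List.len l - 1) 1).foldl (fun ans j =>
      (PySem.List.pyRange (j + 1) (PySem.List.len l) 1).foldl (fun ans k =>
        ans + (PySem.List.pyGetD l k 0 - PySem.List.pyGetD l j 0 - 1)) ans) ans) 0

-- ===== PORT B =====
def daba_alt (s : String) : Int :=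
  ((PySem.List.enumerate s.toList 0).foldl
    (fun st p =>
      if st.2.contains p.2 then
        let ct := st.2.getD p.2 (0, 0)
        (st.1 + (p.1 * ct.1 - ct.2 - ct.1), st.2.insert p.2 (ct.1 + 1, ct.2 + p.1))
      else
        (st.1, st.2.insert p.2 (1, p.1)))
    (0, PySem.Dict.empty)).1

-- ===== PRECONDITION & SPEC =====
def Spec_daba (s : String) (out : Int) : Prop := out = daba_alt s
instance (s : String) (out : Int) : Decidable (Spec_daba s out) := by unfold Spec_daba; infer_instance

-- ===== CLAIM (what is proved, stated in full; the proofs are below) =====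
def Claim_equal_daba : Prop := ∀ (s : String), Dom_daba s → Spec_daba s (daba s)

-- ===== LEMMAS AND PROOFS =====

-- Σ_{k>j} (l[k] - l[j] - 1): what A's innermost loop adds for a fixed j
def innerSum (l : List Int) (j : Int) : Int :=
  ((PySem.List.pyRange (j + 1) (PySem.List.len l) 1).map
    (fun k => PySem.List.pyGetD l k 0 - PySem.List.pyGetD l j 0 - 1)).sum

-- Σ_{j<k} (l[k] - l[j] - 1): A's double loop over one index list
def pairSum (l : List Int) : Int :=
  ((PySem.List.pyRange 0 (PySem.List.len l - 1) 1).map (innerSum l)).sum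

-- A's answer as a function of the built dict
def dictSum (d : PySem.Dict Char (List Int)) : Int :=
  (d.keys.map (fun k => pairSum (d.getD k []))).sum

-- the two fold bodies, named for the proofs
def stepA (d : PySem.Dict Char (List Int)) (p : Int × Char) : PySem.Dict Char (List Int) :=
  if !(d.contains p.2) then d.insert p.2 [p.1] else d.modify p.2 [] (· ++ [p.1])

def stepB (st : Int × PySem.Dict Char (Int × Int)) (p : Int × Char) :
    Int × PySem.Dict Char (Int × Int) :=
  if st.2.contains p.2 then
    let ct := st.2.getD p.2 (0, 0)
    (st.1 + (p.1 * ct.1 - ct.2 - ct.1), st.2.insert p.2 (ct.1 + 1, ct.2 + p.1))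
  else
    (st.1, st.2.insert p.2 (1, p.1))

lemma dabaBuild_eq_enum (cs : List Char) :
    dabaBuild cs = (PySem.List.enumerate cs 0).foldl stepA PySem.Dict.empty := by
  rw [PySem.List.enumerate_eq_map_pyRange cs ' ', List.foldl_map]
  rfl

lemma double_fold_eq (l : List Int) (a : Int) :
    (PySem.List.pyRange 0 (PySem.List.len l - 1) 1).foldl (fun ans j =>
      (PySem.List.pyRange (j + 1) (PySem.List.len l) 1).foldl (fun ans k =>
        ans + (PySem.List.pyGetD l k 0 - PySem.List.pyGetD l j 0 - 1)) ans) a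
      = a + pairSum l := by
  rw [PySem.List.foldl_congr_mem _ _ (fun ans j => ans + innerSum l j) a
    (fun acc j _ => PySem.List.foldl_add _ _ _)]
  rw [PySem.List.foldl_add]
  rfl

lemma keysFold (d : PySem.Dict Char (List Int)) :
    d.keys.foldl (fun ans c =>
      let l := d.getD c []
      (PySem.List.pyRange 0 (PySem.List.len l - 1) 1).foldl (fun ans j =>
        (PySem.List.pyRange (j + 1) (PySem.List.len l) 1).foldl (fun ans k =>
          ans + (PySem.List.pyGetD l k 0 - PySem.List.pyGetD l j 0 - 1)) ans) ans) 0
      = dictSum d := by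
  rw [PySem.List.foldl_congr_mem _ _ (fun ans c => ans + pairSum (d.getD c [])) 0
    (fun acc c _ => double_fold_eq (d.getD c []) acc)]
  rw [PySem.List.foldl_add, zero_add]
  rfl

lemma daba_eq_dictSum (s : String) :
    daba s = dictSum ((PySem.List.enumerate s.toList 0).foldl stepA PySem.Dict.empty) := by
  rw [← dabaBuild_eq_enum]
  exact keysFold (dabaBuild s.toList)

lemma sum_map_update {κ : Type} [DecidableEq κ] (l : List κ) (c : κ) (f g : κ → Int)
    (hnd : l.Nodup) (hc : c ∈ l) (h : ∀ k, k ≠ c → f k = g k) :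
    (l.map g).sum = (l.map f).sum + (g c - f c) := by
  induction l with
  | nil => cases hc
  | cons k t ih =>
    rcases List.nodup_cons.mp hnd with ⟨hk, hnt⟩
    rcases List.mem_cons.mp hc with rfl | hct
    · have : t.map g = t.map f := List.map_congr_left fun x hx => (h x (by rintro rfl; exact hk hx)).symm
      simp [this]; ring
    · have hkc : k ≠ c := by rintro rfl; exact hk hct
      simp only [List.map_cons, List.sum_cons, h k hkc, ih hnt hct]; ring

lemma pyGetD_append_lt (l : List Int) (x : Int) (j : Int) (h0 : 0 ≤ j) (hj : j < (l.length : Int)) :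
    PySem.List.pyGetD (l ++ [x]) j 0 = PySem.List.pyGetD l j 0 := by
  rw [PySem.List.pyGetD_eq_getElem (l ++ [x]) 0 h0 (by simp; omega),
    PySem.List.pyGetD_eq_getElem l 0 h0 (by exact_mod_cast hj)]
  exact List.getElem_append_left (by omega)

lemma innerSum_append (l : List Int) (x : Int) (j : Int) (h0 : 0 ≤ j) (hj : j < (l.length : Int)) :
    innerSum (l ++ [x]) j = innerSum l j + (x - PySem.List.pyGetD l j 0 - 1) := by
  unfold innerSum
  have hlen : PySem.List.len (l ++ [x]) = (l.length : Int) + 1 := by simp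
  rw [hlen, PySem.List.pyRange_one_succ_right (by omega), List.map_append, List.sum_append]
  congr 1
  · rw [PySem.List.len_eq]
    congr 1
    apply List.map_congr_left
    intro k hk
    rcases PySem.List.mem_pyRange_one.mp hk with ⟨hk1, hk2⟩
    rw [pyGetD_append_lt l x k (by omega) (by omega), pyGetD_append_lt l x j h0 hj]
  · simp only [List.map_cons, List.map_nil, List.sum_cons, List.sum_nil, add_zero]
    rw [PySem.List.pyGetD_natCast, pyGetD_append_lt l x j h0 hj]
    have : (l ++ [x]).getD l.length 0 = x := by
      simp [List.getD]
    rw [this]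

lemma pairSum_append (l : List Int) (x : Int) :
    pairSum (l ++ [x]) = pairSum l + ((l.length : Int) * x - l.sum - l.length) := by
  rcases List.eq_nil_or_concat' l with rfl | ⟨t, y, rfl⟩
  · simp [pairSum, PySem.List.pyRange_one_eq_nil]
  · set l := t ++ [y] with hl
    have hm : 1 ≤ (l.length : Int) := by simp [hl]
    unfold pairSum
    have hlen : PySem.List.len (l ++ [x]) = (l.length : Int) + 1 := by simp
    rw [hlen, add_sub_cancel_right]
    have hterm : ∀ j ∈ PySem.List.pyRange 0 (l.length : Int) 1,
        innerSum (l ++ [x]) j = innerSum l j + (x - PySem.List.pyGetD l j 0 - 1) := by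
      intro j hj
      rcases PySem.List.mem_pyRange_one.mp hj with ⟨h0, h1⟩
      exact innerSum_append l x j h0 h1
    rw [List.map_congr_left hterm, PySem.List.sum_map_add_int]
    have hsplit : (PySem.List.pyRange 0 (l.length : Int) 1).map (innerSum l) =
        (PySem.List.pyRange 0 ((l.length : Int) - 1) 1).map (innerSum l)
          ++ [innerSum l ((l.length : Int) - 1)] := by
      rw [show (l.length : Int) = ((l.length : Int) - 1) + 1 by ring,
        PySem.List.pyRange_one_succ_right (by omega)]
      simp
    have hlast : innerSum l ((l.length : Int) - 1) = 0 := by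
      unfold innerSum
      rw [PySem.List.len_eq, sub_add_cancel, PySem.List.pyRange_one_eq_nil (le_refl _)]
      simp
    have h2 : ((PySem.List.pyRange 0 (l.length : Int) 1).map
        (fun j => x - PySem.List.pyGetD l j 0 - 1)).sum = (l.length : Int) * x - l.sum - l.length := by
      have hadd : ((PySem.List.pyRange 0 (l.length : Int) 1).map
            (fun j => x - PySem.List.pyGetD l j 0 - 1)).sum
          + ((PySem.List.pyRange 0 (l.length : Int) 1).map
            (fun j => PySem.List.pyGetD l j 0)).sum
          = ((PySem.List.pyRange 0 (l.length : Int) 1).map (fun _ => x - 1)).sum := by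
        rw [← PySem.List.sum_map_add_int]
        exact congrArg List.sum (List.map_congr_left fun j _ => by ring)
      rw [PySem.List.map_pyGetD_pyRange_zero', PySem.List.sum_map_const_int,
        PySem.List.length_pyRange_one] at hadd
      have : ((((l.length : Int) - 0).toNat : Int)) = (l.length : Int) := by omega
      rw [this] at hadd
      linarith
    rw [hsplit, List.sum_append, hlast, h2]
    simp only [List.sum_cons, List.sum_nil, PySem.List.len_eq, add_zero]

lemma pairSum_single (i : Int) : pairSum [i] = 0 := by
  simp [pairSum, PySem.List.pyRange_one_eq_nil]

lemma dictSum_modify (d : PySem.Dict Char (List Int)) (c : Char) (i : Int)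
    (hnd : d.keys.Nodup) (hc : d.contains c = true) :
    dictSum (d.modify c [] (· ++ [i]))
      = dictSum d + (pairSum (d.getD c [] ++ [i]) - pairSum (d.getD c [])) := by
  unfold dictSum
  have hkeys : (d.modify c [] (· ++ [i])).keys = d.keys := by
    rw [PySem.Dict.keys_modify, PySem.Dict.keys_insert_of_contains _ _ hc]
  rw [hkeys]
  exact sum_map_update d.keys c (fun k => pairSum (d.getD k []))
    (fun k => pairSum ((d.modify c [] (· ++ [i])).getD k [])) hnd
    ((PySem.Dict.contains_iff_mem_keys d c).mp hc)
    (fun k hk => by simp only []; rw [PySem.Dict.getD_modify, if_neg hk]) |>.trans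
    (by rw [PySem.Dict.getD_modify, if_pos rfl])

lemma dictSum_insert_fresh (d : PySem.Dict Char (List Int)) (c : Char) (i : Int)
    (hc : d.contains c = false) :
    dictSum (d.insert c [i]) = dictSum d := by
  unfold dictSum
  rw [PySem.Dict.keys_insert_of_not_contains d [i] hc, List.map_append, List.sum_append]
  have h1 : d.keys.map (fun k => pairSum ((d.insert c [i]).getD k [])) =
      d.keys.map (fun k => pairSum (d.getD k [])) := by
    apply List.map_congr_left
    intro k hk
    have : k ≠ c := by rintro rfl; rw [(PySem.Dict.contains_iff_mem_keys d k).mpr hk] at hc; cases hc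
    rw [PySem.Dict.getD_insert, if_neg this]
  rw [h1]
  simp [PySem.Dict.getD_insert, pairSum_single]

-- the coupled loop invariant of A's dict-building pass and B's single pass
def pvInvAB (ps : List (Int × Char)) : Prop :=
  (((ps.foldl stepA PySem.Dict.empty).keys).Nodup)
  ∧ (∀ c, (ps.foldl stepB (0, PySem.Dict.empty)).2.contains c
        = (ps.foldl stepA PySem.Dict.empty).contains c)
  ∧ (∀ c, (ps.foldl stepB (0, PySem.Dict.empty)).2.getD c (0, 0)
        = ((((ps.foldl stepA PySem.Dict.empty).getD c []).length : Int),
           ((ps.foldl stepA PySem.Dict.empty).getD c []).sum))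
  ∧ (ps.foldl stepB (0, PySem.Dict.empty)).1 = dictSum (ps.foldl stepA PySem.Dict.empty)

lemma inv_holds (ps : List (Int × Char)) : pvInvAB ps := by
  induction ps using List.reverseRecOn with
  | nil =>
    refine ⟨by simp, fun c => by simp, fun c => by simp, by simp [dictSum]⟩
  | append_singleton ps p ih =>
    obtain ⟨hnd, hcont, hgetD, hans⟩ := ih
    obtain ⟨i, c⟩ := p
    unfold pvInvAB
    rw [List.foldl_append, List.foldl_append]
    simp only [List.foldl_cons, List.foldl_nil]
    set dA := ps.foldl stepA PySem.Dict.empty with hdA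
    set stB := ps.foldl stepB (0, PySem.Dict.empty) with hstB
    by_cases h : dA.contains c = true
    · -- existing character
      have hA : stepA dA (i, c) = dA.modify c [] (· ++ [i]) := by
        simp [stepA, h]
      have hB : stepB stB (i, c) =
          (stB.1 + (i * (stB.2.getD c (0,0)).1 - (stB.2.getD c (0,0)).2 - (stB.2.getD c (0,0)).1),
           stB.2.insert c ((stB.2.getD c (0,0)).1 + 1, (stB.2.getD c (0,0)).2 + i)) := by
        simp [stepB, hcont c, h]
      rw [hA, hB]
      refine ⟨?_, ?_, ?_, ?_⟩
      · rw [PySem.Dict.keys_modify, PySem.Dict.keys_insert_of_contains _ _ h]; exact hnd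
      · intro c'
        simp [PySem.Dict.contains_insert, PySem.Dict.contains_modify, hcont c']
      · intro c'
        by_cases hc' : c' = c
        · subst hc'
          rw [PySem.Dict.getD_insert, if_pos rfl, PySem.Dict.getD_modify, if_pos rfl, hgetD _]
          simp
        · rw [PySem.Dict.getD_insert, if_neg hc', PySem.Dict.getD_modify, if_neg hc', hgetD c']
      · rw [dictSum_modify dA c i hnd h, hans, pairSum_append, hgetD c]
        simp only []
        ring
    · -- fresh character
      have h' : dA.contains c = false := by simpa using h
      have hA : stepA dA (i, c) = dA.insert c [i] := by
        simp [stepA, h']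
      have hB : stepB stB (i, c) = (stB.1, stB.2.insert c (1, i)) := by
        simp [stepB, hcont c, h']
      rw [hA, hB]
      refine ⟨?_, ?_, ?_, ?_⟩
      · rw [PySem.Dict.keys_insert_of_not_contains dA [i] h']
        have hcm : c ∉ dA.keys := fun hm => h ((PySem.Dict.contains_iff_mem_keys dA c).mpr hm)
        simp only [List.nodup_append, List.nodup_singleton, true_and]
        refine ⟨hnd, ?_⟩
        intro a ha b hb
        rw [List.mem_singleton] at hb
        subst hb
        exact fun hab => hcm (hab ▸ ha)
      · intro c'
        simp [PySem.Dict.contains_insert, hcont c']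
      · intro c'
        by_cases hc' : c' = c
        · subst hc'
          rw [PySem.Dict.getD_insert, if_pos rfl, PySem.Dict.getD_insert, if_pos rfl]
          simp
        · rw [PySem.Dict.getD_insert, if_neg hc', PySem.Dict.getD_insert, if_neg hc', hgetD c']
      · rw [dictSum_insert_fresh dA c i h', hans]

-- ===== VERDICT (by name: the statement is the Claim_ definition above) =====
theorem daba_spec : Claim_equal_daba := by
  intro s _
  have h := (inv_holds (PySem.List.enumerate s.toList 0)).2.2.2
  show daba s = daba_alt s
  rw [daba_eq_dictSum]
  exact h.symm
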